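-- pv_equiv track=rewrite | github.com/PredatorXL/bootcamp | zad_3_3.py | policz_znaki
-- ===== SOURCE A (Python) =====
-- def policz_znaki(napis, start='<', stop='>'):
--     liczba = 0
--     aktualnypoziom = 0
--
--     for lit in napis:
--         if lit == start:
--             aktualnypoziom += 1
--         elif lit == stop:
--             aktualnypoziom -= 1
--         else:
--             liczba += aktualnypoziom
--
--     return liczba
-- ===== SOURCE B (Python) =====
-- def policz_znaki(napis, start='<', stop='>'):
--     # Two staged passes. Pass 1: suf[i] = number of non-marker characters in napis[i:].
--     # Pass 2: each start marker at i contributes +suf[i+1], each stop marker -suf[i+1]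
--     # (a start raises the level of every later non-marker char by 1, a stop lowers it).
--     n = len(napis)
--     suf = [0] * (n + 1)
--     for i in range(n - 1, -1, -1):
--         suf[i] = suf[i + 1] + (napis[i] != start and napis[i] != stop)
--     total = 0
--     for i in range(n):
--         if napis[i] == start:
--             total += suf[i + 1]
--         elif napis[i] == stop:
--             total -= suf[i + 1]
--     return total
-- ===== Notes on version B (the rewrite author's own statement) =====
-- stated objective: alternative
-- what changed: Swapped the order of summation: instead of one pass accumulating the running nesting level per character, B first builds a suffix table of non-marker character counts and then sums the signed contribution suf[i+1] of each start/stop marker.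
import Mathlib
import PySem

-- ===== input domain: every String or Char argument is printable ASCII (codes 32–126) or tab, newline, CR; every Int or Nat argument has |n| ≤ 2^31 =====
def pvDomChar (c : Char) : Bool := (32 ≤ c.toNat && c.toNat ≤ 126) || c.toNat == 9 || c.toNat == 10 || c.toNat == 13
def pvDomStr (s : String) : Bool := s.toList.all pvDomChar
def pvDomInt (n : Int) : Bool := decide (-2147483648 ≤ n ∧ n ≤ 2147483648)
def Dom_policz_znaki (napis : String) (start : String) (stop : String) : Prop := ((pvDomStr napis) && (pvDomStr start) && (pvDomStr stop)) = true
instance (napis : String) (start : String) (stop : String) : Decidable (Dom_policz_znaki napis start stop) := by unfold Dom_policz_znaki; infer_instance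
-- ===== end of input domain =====

-- B replaces A's one-pass running-level accumulator by two staged passes (suffix table of
-- non-marker counts, then a signed sum over the markers); alternative decomposition, return value only.

-- ===== PORT A =====
-- step for step: liczba/aktualnypoziom accumulator pair, same branch order (start first, then stop)
def policz_znaki (napis : String) (start : String) (stop : String) : Int :=
  (napis.toList.foldl (fun (st : Int × Int) lit =>
      if start.toList = [lit] then (st.1, st.2 + 1)
      else if stop.toList = [lit] then (st.1, st.2 - 1)
      else (st.1 + st.2, st.2)) ((0 : Int), (0 : Int))).1

-- ===== PORT B =====
-- Pass 1 of Source B: the suffix table [suf[i], …, suf[n]] built back to front (cons = the i-th step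
-- of Source B's descending loop; the char-vs-string comparisons napis[i] != start/stop are s ≠ [c]).
def pvSuf (s t : List Char) : List Char → List Int
  | [] => [0]
  | c :: cs =>
    let r := pvSuf s t cs
    ((if s = [c] ∨ t = [c] then 0 else 1) + r.head!) :: r

-- Pass 2 of Source B: walk napis together with suf[1:], adding/subtracting the table entry at markers.
def pvPass2 (s t : List Char) : List Char → List Int → Int
  | [], _ => 0
  | _ :: _, [] => 0
  | c :: cs, v :: vs =>
    (if s = [c] then v else if t = [c] then -v else 0) + pvPass2 s t cs vs

def policz_znaki_alt (napis : String) (start : String) (stop : String) : Int :=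
  let suf := pvSuf start.toList stop.toList napis.toList
  pvPass2 start.toList stop.toList napis.toList suf.tail

-- ===== PRECONDITION & SPEC =====
def Spec_policz_znaki (napis : String) (start : String) (stop : String) (out : Int) : Prop := out = policz_znaki_alt napis start stop
instance (napis : String) (start : String) (stop : String) (out : Int) : Decidable (Spec_policz_znaki napis start stop out) := by unfold Spec_policz_znaki; infer_instance

-- ===== CLAIM (what is proved, stated in full; the proofs are below) =====
def Claim_equal_policz_znaki : Prop := ∀ (napis : String) (start : String) (stop : String), Dom_policz_znaki napis start stop → Spec_policz_znaki napis start stop (policz_znaki napis start stop)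

-- ===== LEMMAS AND PROOFS =====
-- number of non-marker characters in l
def pvNM (s t : List Char) : List Char → Int
  | [] => 0
  | c :: cs => (if s = [c] then 0 else if t = [c] then 0 else 1) + pvNM s t cs

def pvStepA (s t : List Char) (st : Int × Int) (lit : Char) : Int × Int :=
  if s = [lit] then (st.1, st.2 + 1)
  else if t = [lit] then (st.1, st.2 - 1)
  else (st.1 + st.2, st.2)

lemma pvSuf_shape (s t l : List Char) :
    pvSuf s t l = pvNM s t l :: (pvSuf s t l).tail := by
  induction l with
  | nil => simp [pvSuf, pvNM]
  | cons c cs ih =>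
    have hh : (pvSuf s t cs).head! = pvNM s t cs := by rw [ih]; simp
    simp only [pvSuf, pvNM, List.tail_cons, hh]
    clear ih hh
    split_ifs <;> (try rfl) <;> tauto

lemma foldA_shift (s t : List Char) (l : List Char) (li po : Int) :
    l.foldl (pvStepA s t) (li, po) =
      (li + po * pvNM s t l + (l.foldl (pvStepA s t) (0, 0)).1,
       po + (l.foldl (pvStepA s t) (0, 0)).2) := by
  induction l generalizing li po with
  | nil => simp [pvNM]
  | cons c cs ih =>
    simp only [List.foldl_cons, pvStepA, pvNM]
    split_ifs with h1 h2
    · rw [ih li (po + 1), ih 0 (0 + 1)]; simp [Prod.ext_iff]; constructor <;> ring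
    · rw [ih li (po - 1), ih 0 (0 - 1)]; simp [Prod.ext_iff]; constructor <;> ring
    · rw [ih (li + po) po, ih (0 + 0) 0]; simp [Prod.ext_iff]; ring

lemma pass2_eq_foldA (s t l : List Char) :
    pvPass2 s t l (pvSuf s t l).tail = (l.foldl (pvStepA s t) (0, 0)).1 := by
  induction l with
  | nil => simp [pvPass2]
  | cons c cs ih =>
    have hsuf : (pvSuf s t (c :: cs)).tail = pvNM s t cs :: (pvSuf s t cs).tail := by
      simp only [pvSuf, List.tail_cons]; exact pvSuf_shape s t cs
    rw [hsuf]
    simp only [pvPass2, ih, List.foldl_cons, pvStepA]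
    split_ifs with h1 h2
    · rw [foldA_shift s t cs 0 (0 + 1)]; simp
    · rw [foldA_shift s t cs 0 (0 - 1)]; simp
    · rw [foldA_shift s t cs (0 + 0) 0]; simp

-- ===== VERDICT (by name: the statement is the Claim_ definition above) =====
theorem policz_znaki_spec : Claim_equal_policz_znaki := by
  intro napis start stop _
  unfold Spec_policz_znaki policz_znaki policz_znaki_alt
  have hA : (fun (st : Int × Int) lit =>
      if start.toList = [lit] then (st.1, st.2 + 1)
      else if stop.toList = [lit] then (st.1, st.2 - 1)
      else (st.1 + st.2, st.2)) = pvStepA start.toList stop.toList := by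
    funext st lit; simp [pvStepA]
  rw [hA, ← pass2_eq_foldA]
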